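-- pv_equiv track=rewrite | github.com/pforderique/Python-Scripts | Coding_Practice/Data-Structures/hash-tables/practice.py | groupingDishes
-- ===== SOURCE A (Python) =====
-- def groupingDishes(dishes):
--     #for each dish's ingredient, add it to hash
--     ingredients = {}
--     for dish in dishes:
--         dishName = dish[0]
--         for idx in range(1, len(dish)):
--             ingre = dish[idx]
--             try:
--                 ingredients[ingre].append(dishName)
--             except:
--                 ingredients[ingre] = []
--                 ingredients[ingre].append(dishName)
--
--     out = []
--     for key in sorted(ingredients.keys()):
--         if len(ingredients[key]) >= 2:
--             out.append([key]+sorted(ingredients[key]))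
--     return out
-- ===== SOURCE B (Python) =====
-- def groupingDishes(dishes):
--     # flatten to (ingredient, dishName) pairs, sort once, then group consecutive runs
--     pairs = sorted((ingre, dish[0]) for dish in dishes for ingre in dish[1:])
--     out = []
--     i, n = 0, len(pairs)
--     while i < n:
--         j = i + 1
--         while j < n and pairs[j][0] == pairs[i][0]:
--             j += 1
--         if j - i >= 2:
--             out.append([pairs[i][0]] + [p[1] for p in pairs[i:j]])
--         i = j
--     return out
-- ===== Notes on version B (the rewrite author's own statement) =====
-- stated objective: alternative
-- what changed: Replaces the dict-of-lists grouping plus per-key sorting with one flattened (ingredient, dishName) pair list sorted once lexicographically and then grouped by scanning consecutive runs; no dict and no per-group sort remain.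
import Mathlib
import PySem

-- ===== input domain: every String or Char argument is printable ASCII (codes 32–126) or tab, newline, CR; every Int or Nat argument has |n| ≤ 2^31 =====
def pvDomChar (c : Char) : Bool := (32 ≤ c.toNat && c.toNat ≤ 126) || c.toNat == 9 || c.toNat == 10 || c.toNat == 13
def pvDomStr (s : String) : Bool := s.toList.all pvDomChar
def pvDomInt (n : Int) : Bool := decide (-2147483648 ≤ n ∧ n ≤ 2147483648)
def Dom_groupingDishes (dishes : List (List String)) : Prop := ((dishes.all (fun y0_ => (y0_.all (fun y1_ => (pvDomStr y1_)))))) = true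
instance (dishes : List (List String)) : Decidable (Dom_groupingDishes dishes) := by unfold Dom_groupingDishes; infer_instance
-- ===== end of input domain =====

-- B replaces A's dict-of-lists grouping (plus per-key sorting) by one globally sorted
-- (ingredient, dishName) pair list scanned in consecutive runs: an alternative algorithm
-- of the same cost. Return-value equivalence; neither program mutates its argument.

-- ===== PORT A =====
def groupingDishes (dishes : List (List String)) : List (List String) :=
  -- ingredients = {}; for dish in dishes: dishName = dish[0]; for idx in range(1, len(dish)): try/except append
  let ingredients : PySem.Dict String (List String) :=
    dishes.foldl (fun d dish =>
      let dishName := PySem.List.pyGetD dish 0 ""   -- dish[0]; exact for nonempty dish (Pre_ excludes [])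
      (PySem.List.pyRange 1 (PySem.List.len dish) 1).foldl
        (fun d idx =>
          let ingre := PySem.List.pyGetD dish idx ""
          -- try: d[ingre].append(name)  except: d[ingre] = []; append  ==  d[ingre] = d.get(ingre, []) + [name]
          d.modify ingre [] (fun l => l ++ [dishName]))
        d)
      PySem.Dict.empty
  -- out = []; for key in sorted(ingredients.keys()): if len(...) >= 2: out.append([key]+sorted(...))
  (PySem.List.sorted ingredients.keys (fun x => x) false).foldl
    (fun out key =>
      if 2 ≤ (ingredients.getD key []).length then
        out ++ [[key] ++ PySem.List.sorted (ingredients.getD key []) (fun x => x) false]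
      else out)
    []

-- ===== PORT B =====
-- pairs = ((ingre, dish[0]) for dish in dishes for ingre in dish[1:])   (dish[1:] = drop 1; dish[0] never read when dish[1:] is empty)
def pvPairs (dishes : List (List String)) : List (String × String) :=
  dishes.flatMap (fun dish => (dish.drop 1).map (fun ingre => (ingre, PySem.List.pyGetD dish 0 "")))

-- the while-loop scan over the sorted pair list: each outer step consumes one run of equal
-- ingredients; the fuel argument (= n, the outer loop runs at most n times) keeps it structural
def pvRuns : Nat → List (String × String) → List (List String)
  | _, [] => []
  | 0, _ :: _ => []
  | fuel + 1, (k, v) :: rest =>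
    let grp := rest.takeWhile (fun p => p.1 == k)   -- inner while: j scans while pairs[j][0] == pairs[i][0]
    let rem := rest.dropWhile (fun p => p.1 == k)
    (if 2 ≤ grp.length + 1 then [[k] ++ (v :: grp.map (fun p => p.2))] else []) ++ pvRuns fuel rem

def groupingDishes_alt (dishes : List (List String)) : List (List String) :=
  let pairs := PySem.List.sorted2 (pvPairs dishes) (fun p => p.1) (fun p => p.2) false
  pvRuns pairs.length pairs

-- ===== PRECONDITION & SPEC =====
-- Pre_ excludes inputs containing an empty dish: there Python A raises IndexError at dish[0].
def Pre_groupingDishes (dishes : List (List String)) : Prop := ∀ dish ∈ dishes, dish ≠ []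
instance (dishes : List (List String)) : Decidable (Pre_groupingDishes dishes) := by unfold Pre_groupingDishes; infer_instance
def pvWitness_groupingDishes : List (List String) := [["salad", "tomato", "oil"], ["soup", "tomato"]]

def Spec_groupingDishes (dishes : List (List String)) (out : List (List String)) : Prop := out = groupingDishes_alt dishes
instance (dishes : List (List String)) (out : List (List String)) : Decidable (Spec_groupingDishes dishes out) := by unfold Spec_groupingDishes; infer_instance

-- ===== CLAIM (what is proved, stated in full; the proofs are below) =====
def Claim_equal_groupingDishes : Prop := ∀ (dishes : List (List String)), Dom_groupingDishes dishes → Pre_groupingDishes dishes → Spec_groupingDishes dishes (groupingDishes dishes)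

-- ===== LEMMAS AND PROOFS =====

-- the lexicographic "≤" on pairs that the global sort establishes
def pvLexLe (p q : String × String) : Prop := p.1 < q.1 ∨ (p.1 = q.1 ∧ p.2 ≤ q.2)

-- the comparator sorted2 uses (reverse = false)
def pvBLt (a b : String × String) : Bool :=
  decide (a.1 < b.1) || (!decide (b.1 < a.1) && decide (a.2 < b.2))

lemma pvLexLe_of_bLt {a b : String × String} (h : pvBLt a b = true) : pvLexLe a b := by
  unfold pvBLt at h; unfold pvLexLe
  simp only [Bool.or_eq_true, Bool.and_eq_true, Bool.not_eq_true', decide_eq_true_eq,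
    decide_eq_false_iff_not] at h
  rcases h with h | ⟨h1, h2⟩
  · exact Or.inl h
  · rcases lt_or_eq_of_le (le_of_not_gt h1) with h | h
    · exact Or.inl h
    · exact Or.inr ⟨h, le_of_lt h2⟩

lemma pvLexLe_of_not_bLt {a b : String × String} (h : pvBLt a b = false) : pvLexLe b a := by
  unfold pvBLt at h; unfold pvLexLe
  simp only [Bool.or_eq_false_iff, Bool.and_eq_false_iff, Bool.not_eq_false', decide_eq_true_eq,
    decide_eq_false_iff_not] at h
  obtain ⟨h1, h2⟩ := h
  rcases lt_or_eq_of_le (le_of_not_gt h1) with hlt | heq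
  · exact Or.inl hlt
  · rcases h2 with h | h
    · exact Or.inl h
    · exact Or.inr ⟨heq, le_of_not_gt h⟩

lemma pvLexLe_trans {a b c : String × String} (h1 : pvLexLe a b) (h2 : pvLexLe b c) : pvLexLe a c := by
  unfold pvLexLe at *
  rcases h1 with h1 | ⟨e1, l1⟩ <;> rcases h2 with h2 | ⟨e2, l2⟩
  · exact Or.inl (lt_trans h1 h2)
  · exact Or.inl (e2 ▸ h1)
  · exact Or.inl (e1 ▸ h2)
  · exact Or.inr ⟨e1.trans e2, le_trans l1 l2⟩

lemma pv_insertBy_pairwise (x : String × String) (ys : List (String × String))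
    (h : ys.Pairwise pvLexLe) : (PySem.List.insertBy pvBLt x ys).Pairwise pvLexLe := by
  induction ys with
  | nil => simp [PySem.List.insertBy]
  | cons y ys ih =>
    rw [List.pairwise_cons] at h
    obtain ⟨hy, hys⟩ := h
    by_cases hb : pvBLt x y = true
    · rw [PySem.List.insertBy, if_pos hb]
      refine List.pairwise_cons.2 ⟨?_, List.pairwise_cons.2 ⟨hy, hys⟩⟩
      intro z hz
      rcases List.mem_cons.1 hz with rfl | hz
      · exact pvLexLe_of_bLt hb
      · exact pvLexLe_trans (pvLexLe_of_bLt hb) (hy z hz)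
    · rw [PySem.List.insertBy, if_neg hb]
      refine List.pairwise_cons.2 ⟨?_, ih hys⟩
      intro z hz
      rcases (PySem.List.mem_insertBy _ _ _ _).1 hz with rfl | hz
      · exact pvLexLe_of_not_bLt (Bool.eq_false_iff.2 hb)
      · exact hy z hz

lemma pv_foldl_insertBy_pairwise (P : List (String × String)) (acc : List (String × String))
    (hacc : acc.Pairwise pvLexLe) :
    (P.foldl (fun acc x => PySem.List.insertBy pvBLt x acc) acc).Pairwise pvLexLe := by
  induction P generalizing acc with
  | nil => exact hacc
  | cons p P ih => exact ih _ (pv_insertBy_pairwise p acc hacc)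

lemma pv_sorted2_pairwise (P : List (String × String)) :
    (PySem.List.sorted2 P (fun p => p.1) (fun p => p.2) false).Pairwise pvLexLe := by
  have : PySem.List.sorted2 P (fun p => p.1) (fun p => p.2) false
      = P.foldl (fun acc x => PySem.List.insertBy pvBLt x acc) [] := rfl
  rw [this]
  exact pv_foldl_insertBy_pairwise P [] (by simp)

lemma pv_dict_eq (dishes : List (List String)) (d0 : PySem.Dict String (List String)) :
    dishes.foldl (fun d dish =>
      (PySem.List.pyRange 1 (PySem.List.len dish) 1).foldl
        (fun d idx => d.modify (PySem.List.pyGetD dish idx "") []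
          (fun l => l ++ [PySem.List.pyGetD dish 0 ""])) d) d0
    = (pvPairs dishes).foldl (fun d p => d.modify p.1 [] (fun l => l ++ [p.2])) d0 := by
  induction dishes generalizing d0 with
  | nil => rfl
  | cons dish rest ih =>
    simp only [List.foldl_cons, pvPairs, List.flatMap_cons, List.foldl_append]
    rw [ih]
    congr 1
    rw [PySem.List.foldl_pyRange_pyGetD dish "" (fun d ingre => d.modify ingre [] (fun l => l ++ [PySem.List.pyGetD dish 0 ""])) d0 (by norm_num), List.foldl_map]
    rfl


lemma pv_runs_spec (fuel : Nat) (Q : List (String × String)) (hf : Q.length ≤ fuel)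
    (h : Q.Pairwise pvLexLe) :
    pvRuns fuel Q =
      ((PySem.List.sorted (PySem.Set.ofList (Q.map (fun p => p.1))) (fun x => x) false).filter
        (fun k => decide (2 ≤ (Q.filter (fun p => p.1 == k)).length))).map
        (fun k => k :: (Q.filter (fun p => p.1 == k)).map (fun p => p.2)) := by
  induction fuel generalizing Q with
  | zero =>
    have : Q = [] := List.length_eq_zero_iff.1 (Nat.le_zero.1 hf)
    subst this; rfl
  | succ fuel ih =>
    match Q, h with
    | [], _ => rfl
    | (k, v) :: rest, h =>
      rw [List.pairwise_cons] at h
      obtain ⟨hky, hrest⟩ := h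
      set grp := rest.takeWhile (fun p => p.1 == k) with hgrpdef
      set rem := rest.dropWhile (fun p => p.1 == k) with hremdef
      have hsplit : grp ++ rem = rest := List.takeWhile_append_dropWhile
      have hgrp : ∀ p ∈ grp, p.1 = k := fun p hp => by
        simpa using List.mem_takeWhile_imp hp
      have hremrest : ∀ p ∈ rem, p ∈ rest := fun p hp =>
        (List.dropWhile_sublist _).mem hp
      have hrempw : rem.Pairwise pvLexLe := hrest.sublist (List.dropWhile_sublist _)
      -- every key in rem is strictly greater than k
      have hkrem : ∀ p ∈ rem, k < p.1 := by
        intro p hp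
        match hrm : rem, hp with
        | r :: rem', hp =>
          have hdw : List.dropWhile (fun p => p.1 == k) rest = r :: rem' := hremdef.symm
          have hr1 : (r.1 == k) = false := by
            have := List.head_dropWhile_not (fun p => (p.1 == k)) (l := rest) (by simp [hdw])
            simp_rw [hdw] at this
            simpa using this
          have hkr : k < r.1 := by
            have hlex := hky r (hremrest r (by simp))
            rcases hlex with h | ⟨he, _⟩
            · exact h
            · simp [← he] at hr1
          rcases List.mem_cons.1 hp with rfl | hp'
          · exact hkr
          · have : pvLexLe r p := (List.pairwise_cons.1 hrempw).1 p hp'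
            rcases this with h | ⟨he, _⟩
            · exact lt_trans hkr h
            · exact he ▸ hkr
      -- the run for key k
      have hfk : ((k, v) :: rest).filter (fun p => p.1 == k) = (k, v) :: grp := by
        rw [← hsplit]
        simp only [List.filter_cons, List.filter_append]
        rw [List.filter_eq_self.2 (fun p hp => by simp [hgrp p hp]),
          List.filter_eq_nil_iff.2 (fun p hp => by simp [ne_of_gt (hkrem p hp)])]
        simp
      -- filters for other keys reduce to rem
      have hfk' : ∀ k', k ≠ k' → ((k, v) :: rest).filter (fun p => p.1 == k')
          = rem.filter (fun p => p.1 == k') := by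
        intro k' hne
        rw [← hsplit]
        simp only [List.filter_cons, List.filter_append]
        rw [List.filter_eq_nil_iff.2 (fun p hp => by simp [hgrp p hp, hne])]
        simp [hne]
      -- sorted distinct keys of Q = k :: sorted distinct keys of rem
      set Krem := PySem.List.sorted (PySem.Set.ofList (rem.map (fun p => p.1))) (fun x => x) false
        with hKremdef
      have hKremmem : ∀ x ∈ Krem, x ∈ rem.map (fun p => p.1) := by
        intro x hx
        exact (PySem.Set.mem_ofList _ _).1 ((PySem.List.mem_sorted _ _ _ _).1 hx)
      have hkK : ∀ x ∈ Krem, k < x := by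
        intro x hx
        obtain ⟨p, hp, rfl⟩ := List.mem_map.1 (hKremmem x hx)
        exact hkrem p hp
      have hKnodup : Krem.Nodup :=
        ((PySem.List.sorted_perm _ _ _).nodup_iff).2 (PySem.Set.nodup_ofList _)
      have hKeys : PySem.List.sorted (PySem.Set.ofList (((k, v) :: rest).map (fun p => p.1)))
          (fun x => x) false = k :: Krem := by
        apply PySem.List.sorted_eq_of_perm_of_pairwise_lt
        · apply (List.perm_ext_iff_of_nodup ?_ (PySem.Set.nodup_ofList _)).2
          · intro a
            simp only [List.mem_cons, PySem.Set.mem_ofList, List.mem_map, ← hsplit,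
              List.mem_append]
            constructor
            · rintro (h | ha)
              · exact ⟨(k, v), Or.inl rfl, h.symm⟩
              · obtain ⟨p, hp, rfl⟩ := List.mem_map.1 (hKremmem a ha)
                exact ⟨p, Or.inr (Or.inr hp), rfl⟩
            · rintro ⟨p, (rfl | hp | hp), rfl⟩
              · exact Or.inl rfl
              · exact Or.inl (hgrp p hp)
              · exact Or.inr ((PySem.List.mem_sorted _ _ _ _).2 ((PySem.Set.mem_ofList _ _).2
                  (List.mem_map.2 ⟨p, hp, rfl⟩)))
          · exact List.nodup_cons.2 ⟨fun hk => absurd (hkK k hk) (lt_irrefl k), hKnodup⟩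
        · refine List.pairwise_cons.2 ⟨hkK, ?_⟩
          exact PySem.List.sorted_ofList_pairwise_lt _
      -- assemble
      have hrecur : pvRuns (fuel + 1) ((k, v) :: rest)
          = (if 2 ≤ grp.length + 1 then [[k] ++ (v :: grp.map (fun p => p.2))] else [])
            ++ pvRuns fuel rem := rfl
      have hlenrem : rem.length ≤ fuel := by
        have h1 : rem.length ≤ rest.length := List.length_dropWhile_le _ _
        simp only [List.length_cons] at hf
        omega
      have hIH := ih rem hlenrem hrempw
      have hcong1 : Krem.filter
            (fun k' => decide (2 ≤ (((k, v) :: rest).filter (fun p => p.1 == k')).length))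
          = Krem.filter (fun k' => decide (2 ≤ (rem.filter (fun p => p.1 == k')).length)) :=
        List.filter_congr (fun k' hk' => by rw [hfk' k' (ne_of_lt (hkK k' hk'))])
      have hcong2 : (Krem.filter (fun k' => decide (2 ≤ (rem.filter (fun p => p.1 == k')).length))).map
            (fun k' => k' :: (((k, v) :: rest).filter (fun p => p.1 == k')).map (fun p => p.2))
          = (Krem.filter (fun k' => decide (2 ≤ (rem.filter (fun p => p.1 == k')).length))).map
            (fun k' => k' :: (rem.filter (fun p => p.1 == k')).map (fun p => p.2)) :=
        List.map_congr_left (fun k' hk' => by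
          rw [hfk' k' (ne_of_lt (hkK k' (List.mem_of_mem_filter hk')))])
      rw [hrecur, hKeys, hIH, ← hKremdef, List.filter_cons, hfk, hcong1]
      by_cases hc : 2 ≤ grp.length + 1
      · rw [if_pos (show decide (2 ≤ ((k, v) :: grp).length) = true by simpa using hc),
          List.map_cons, hcong2, if_pos hc]
        simp [hfk]
      · rw [if_neg (show ¬ (decide (2 ≤ ((k, v) :: grp).length) = true) by simpa using hc),
          hcong2, if_neg hc]
        simp

-- A's output, characterised as filter/map over its sorted key list
lemma pv_A_char (dishes : List (List String)) :
    groupingDishes dishes =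
    ((PySem.List.sorted (PySem.Set.ofList ((pvPairs dishes).map (fun p => p.1))) (fun x => x) false).filter
        (fun k => decide (2 ≤ ((pvPairs dishes).filter (fun p => p.1 == k)).length))).map
        (fun k => [k] ++ PySem.List.sorted (((pvPairs dishes).filter (fun p => p.1 == k)).map (fun p => p.2)) (fun x => x) false) := by
  simp only [groupingDishes]
  rw [pv_dict_eq]
  rw [PySem.Dict.keys_foldl_modify_key (pvPairs dishes) (fun p => p.1) [] (fun _ p => (fun l => l ++ [p.2])) PySem.Dict.empty]
  rw [PySem.Dict.keys_empty]
  set kd := (pvPairs dishes).foldl (fun d p => d.modify p.1 [] (fun l => l ++ [p.2])) PySem.Dict.empty with hkd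
  rw [PySem.List.foldl_append_ite (fun key => 2 ≤ (kd.getD key []).length)
    (fun key => [key] ++ PySem.List.sorted (kd.getD key []) (fun x => x) false)]
  simp only [hkd, PySem.Dict.getD_foldl_modify_append, PySem.Dict.getD_empty, List.nil_append,
    PySem.Set.update_nil_left, List.length_map]

-- ===== VERDICT (by name: the statement is the Claim_ definition above) =====
theorem groupingDishes_spec : Claim_equal_groupingDishes := by
  intro dishes _ _
  unfold Spec_groupingDishes
  rw [pv_A_char]
  simp only [groupingDishes_alt]
  rw [pv_runs_spec _ _ le_rfl (pv_sorted2_pairwise _)]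
  set P := pvPairs dishes with hP
  set Q := PySem.List.sorted2 P (fun p => p.1) (fun p => p.2) false with hQ
  have hQP : Q.Perm P := PySem.List.sorted2_perm P _ _ false
  have hkeys : PySem.List.sorted (PySem.Set.ofList (P.map (fun p => p.1))) (fun x => x) false
      = PySem.List.sorted (PySem.Set.ofList (Q.map (fun p => p.1))) (fun x => x) false :=
    PySem.List.sorted_eq_sorted_of_perm _ _ _ (fun a b h => h)
      ((List.perm_ext_iff_of_nodup (PySem.Set.nodup_ofList _) (PySem.Set.nodup_ofList _)).2
        (fun a => by
          simp only [PySem.Set.mem_ofList]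
          exact (hQP.map (fun p => p.1)).mem_iff.symm))
  rw [hkeys]
  have hlen : ∀ k, (P.filter (fun p => p.1 == k)).length = (Q.filter (fun p => p.1 == k)).length :=
    fun k => ((hQP.filter _).length_eq).symm
  rw [List.filter_congr (fun k _ => by rw [hlen k])]
  refine List.map_congr_left (fun k hk => ?_)
  have hperm : ((Q.filter (fun p => p.1 == k)).map (fun p => p.2)).Perm
      ((P.filter (fun p => p.1 == k)).map (fun p => p.2)) := (hQP.filter _).map _
  have hpw : ((Q.filter (fun p => p.1 == k)).map (fun p => p.2)).Pairwise (· ≤ ·) := by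
    rw [List.pairwise_map]
    refine ((pv_sorted2_pairwise P).filter _).imp_of_mem ?_
    intro a b ha hb hab
    have ha' : a.1 = k := by simpa using (List.mem_filter.1 ha).2
    have hb' : b.1 = k := by simpa using (List.mem_filter.1 hb).2
    rcases hab with h | ⟨_, h2⟩
    · rw [ha', hb'] at h
      exact absurd h (lt_irrefl k)
    · exact h2
  rw [PySem.List.sorted_id_eq_of_perm_of_pairwise _ _ hperm hpw]
  simp
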